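-- pv_equiv track=rewrite | github.com/avinashraghuthu/dynamic-programming | unbounded_knapsack/max_ribbon_cut_count.py | max_ribbon_cut_count
-- ===== SOURCE A (Python) =====
-- import math
--
-- def max_ribbon_cut_count(ribbon_lengths, total_ribbon_length):
-- 	arr_len = len(ribbon_lengths)
-- 	if arr_len == 0 or total_ribbon_length <= 0:
-- 		return 0
--
-- 	dp = [[-math.inf for j in range(total_ribbon_length + 1)] for i in range(arr_len)]
--
-- 	for i in range(arr_len):
-- 		dp[i][0] = 0
--
-- 	for i in range(arr_len):
-- 		for s in range(1, total_ribbon_length + 1):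
-- 			if i > 0:
-- 				dp[i][s] = dp[i - 1][s]
-- 			if ribbon_lengths[i] <= s:
-- 				dp[i][s] = max(dp[i - 1][s], 1 + dp[i][s - ribbon_lengths[i]])
-- 	return -1 if dp[arr_len - 1][total_ribbon_length] == -math.inf else \
-- 		dp[arr_len - 1][total_ribbon_length]
-- ===== SOURCE B (Python) =====
-- def max_ribbon_cut_count(ribbon_lengths, total_ribbon_length):
--     if not ribbon_lengths or total_ribbon_length <= 0:
--         return 0
--     # sum-major DP: best[s] = max piece count totaling exactly s (None = unachievable),
--     # computed once per s as the best extension of a smaller achievable total.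
--     best = [0] + [None] * total_ribbon_length
--     for s in range(1, total_ribbon_length + 1):
--         m = None
--         for r in ribbon_lengths:
--             if 0 < r <= s and best[s - r] is not None:
--                 c = best[s - r] + 1
--                 if m is None or c > m:
--                     m = c
--         best[s] = m
--     return -1 if best[total_ribbon_length] is None else best[total_ribbon_length]
-- ===== Notes on version B (the rewrite author's own statement) =====
-- stated objective: alternative
-- what changed: Replaces A's item-major 2-D table DP (one row of -inf float sentinels per ribbon type, with a per-cell copy of the previous row) by a sum-major single-array DP that computes each cell once: best[s] is the max over ribbon lengths r of 1+best[s-r]; the item dimension disappears, which is valid because pieces are reusable so the optimum is independent of item order.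
-- outside the precondition, e.g. on max_ribbon_cut_count([2, 0], 4): A returns 3, B returns 2; on max_ribbon_cut_count([0, 2], 4): A returns 2, B returns 2; on max_ribbon_cut_count([-1], 1): A raises IndexError, B returns -1
import Mathlib
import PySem

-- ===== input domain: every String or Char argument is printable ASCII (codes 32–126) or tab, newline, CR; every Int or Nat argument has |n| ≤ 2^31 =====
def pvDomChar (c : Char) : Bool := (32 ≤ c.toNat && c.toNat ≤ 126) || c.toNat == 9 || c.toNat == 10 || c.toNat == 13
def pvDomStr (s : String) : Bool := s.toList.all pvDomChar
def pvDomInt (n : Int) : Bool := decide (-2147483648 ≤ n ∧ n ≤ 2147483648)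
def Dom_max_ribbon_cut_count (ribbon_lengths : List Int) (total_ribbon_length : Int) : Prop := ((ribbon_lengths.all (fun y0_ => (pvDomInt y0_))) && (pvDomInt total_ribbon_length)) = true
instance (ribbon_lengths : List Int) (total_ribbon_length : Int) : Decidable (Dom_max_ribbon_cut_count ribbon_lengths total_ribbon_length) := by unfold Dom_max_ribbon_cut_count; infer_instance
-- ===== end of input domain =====

-- B replaces A's item-major 2-D table DP by a sum-major single-array DP computing each cell once
-- (alternative decomposition; item order is irrelevant because pieces are reusable).
-- Python's -inf dp entries (A) and None entries (B) are modeled as (none : Option Int).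

-- ===== PORT A =====
-- max over {-inf}∪Int: none plays -math.inf
def omax (a b : Option Int) : Option Int :=
  match a, b with
  | none, b => b
  | some x, none => some x
  | some x, some y => some (max x y)

-- 1 + v  (1 + -inf = -inf)
def oadd1 (a : Option Int) : Option Int := a.map (· + 1)

-- dp[i][s] read; negative i wraps from the end exactly as in Python (dp[i-1] at i=0 reads dp[-1])
def getCell (dp : List (List (Option Int))) (i : Int) (s : Nat) : Option Int :=
  ((PySem.List.pyGet? dp i).getD []).getD s none

-- dp[i][s] = v
def setCell (dp : List (List (Option Int))) (i s : Nat) (v : Option Int) : List (List (Option Int)) :=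
  dp.set i ((dp.getD i []).set s v)

-- body of A's inner loop over s (s = s0 + 1 since Python's range starts at 1).
-- dp[i][s - ribbon_lengths[i]] is rendered with Nat subtraction s - r.toNat: exact for 0 ≤ r ≤ s
-- (the guard gives r ≤ s; for r < 0 Python raises IndexError, excluded by Pre_).
def aInner (rl : List Int) (i : Nat) (dp : List (List (Option Int))) (s0 : Nat) : List (List (Option Int)) :=
  let s : Nat := s0 + 1
  let dp' := if 0 < i then setCell dp i s (getCell dp ((i : Int) - 1) s) else dp
  let r := rl.getD i 0
  if r ≤ (s : Int) then
    setCell dp' i s (omax (getCell dp' ((i : Int) - 1) s) (oadd1 (getCell dp' (i : Int) (s - r.toNat))))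
  else dp'

def max_ribbon_cut_count (ribbon_lengths : List Int) (total_ribbon_length : Int) : Int :=
  let arr_len := ribbon_lengths.length
  if arr_len = 0 ∨ total_ribbon_length ≤ 0 then 0
  else
    let T := total_ribbon_length.toNat
    let dp0 : List (List (Option Int)) := List.replicate arr_len (List.replicate (T + 1) none)
    let dp1 := (List.range arr_len).foldl (fun dp i => setCell dp i 0 (some 0)) dp0
    let dp2 := (List.range arr_len).foldl (fun dp i => (List.range T).foldl (aInner ribbon_lengths i) dp) dp1
    match getCell dp2 ((arr_len : Int) - 1) T with
    | none => -1
    | some v => v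

-- ===== PORT B =====
-- B's inner-loop body: if best[s-r] is not None: c = best[s-r]+1; if m is None or c > m: m = c
def bChoose (m : Option Int) (v : Option Int) : Option Int :=
  match v with
  | none => m
  | some p =>
    match m with
    | none => some (p + 1)
    | some q => if p + 1 > q then some (p + 1) else m

def max_ribbon_cut_count_alt (ribbon_lengths : List Int) (total_ribbon_length : Int) : Int :=
  if ribbon_lengths = [] ∨ total_ribbon_length ≤ 0 then 0
  else
    let T := total_ribbon_length.toNat
    let best0 : List (Option Int) := some 0 :: List.replicate T none
    let best := (List.range T).foldl (fun best s0 =>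
      let s : Nat := s0 + 1
      let m := ribbon_lengths.foldl (fun m r =>
        if 0 < r ∧ r ≤ (s : Int) then bChoose m (best.getD (s - r.toNat) none) else m) none
      best.set s m) best0
    match best.getD T none with
    | none => -1
    | some v => v

-- ===== PRECONDITION & SPEC =====
-- Pre_ excludes (for nonempty lists with positive total) negative ribbon lengths, on which A raises
-- IndexError, and zero ribbon lengths, a corner no caller would specify: a zero-length piece could be
-- taken arbitrarily often, so no finite count is right there — A's finite value depends on the zero's
-- position in the list, while B counts only positive pieces.
def Pre_max_ribbon_cut_count (ribbon_lengths : List Int) (total_ribbon_length : Int) : Prop :=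
  total_ribbon_length ≤ 0 ∨ ribbon_lengths = [] ∨ ∀ r ∈ ribbon_lengths, 1 ≤ r
instance (ribbon_lengths : List Int) (total_ribbon_length : Int) : Decidable (Pre_max_ribbon_cut_count ribbon_lengths total_ribbon_length) := by unfold Pre_max_ribbon_cut_count; infer_instance

def pvWitness_max_ribbon_cut_count : List Int × Int := ([2, 3, 5], 7)

def Spec_max_ribbon_cut_count (ribbon_lengths : List Int) (total_ribbon_length : Int) (out : Int) : Prop := out = max_ribbon_cut_count_alt ribbon_lengths total_ribbon_length
instance (ribbon_lengths : List Int) (total_ribbon_length : Int) (out : Int) : Decidable (Spec_max_ribbon_cut_count ribbon_lengths total_ribbon_length out) := by unfold Spec_max_ribbon_cut_count; infer_instance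

-- ===== CLAIM (what is proved, stated in full; the proofs are below) =====
def Claim_equal_max_ribbon_cut_count : Prop := ∀ (ribbon_lengths : List Int) (total_ribbon_length : Int), Dom_max_ribbon_cut_count ribbon_lengths total_ribbon_length → Pre_max_ribbon_cut_count ribbon_lengths total_ribbon_length → Spec_max_ribbon_cut_count ribbon_lengths total_ribbon_length (max_ribbon_cut_count ribbon_lengths total_ribbon_length)

-- ===== LEMMAS AND PROOFS =====

-- ---- shared cell machinery (proof layer): the value either program's update writes at position s ----
def cellF (r : Int) (prev : List (Option Int)) : Nat → Option Int
  | 0 => some 0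
  | (s + 1) =>
    if _h1 : r ≤ ((s : Int) + 1) then
      if h2 : 1 ≤ r then omax (prev.getD (s + 1) none) (oadd1 (cellF r prev (s + 1 - r.toNat)))
      else omax (prev.getD (s + 1) none) (oadd1 (prev.getD (s + 1) none))
    else prev.getD (s + 1) none
  decreasing_by omega

def initRow (T : Nat) : List (Option Int) := some 0 :: List.replicate T none

-- one in-place cell relaxation (proof layer; mirrors A's take-branch write)
def bStep (r : Int) (row : List (Option Int)) (s : Nat) : List (Option Int) :=
  match row.getD (s - r.toNat) none with
  | none => row
  | some p =>
    match row.getD s none with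
    | none => row.set s (some (p + 1))
    | some c => if p + 1 > c then row.set s (some (p + 1)) else row

-- one item-major sweep over sums 1..T
def rowPass (r : Int) (T : Nat) (row : List (Option Int)) : List (Option Int) :=
  (List.range T).foldl (fun row s0 =>
    let s : Nat := s0 + 1
    if r ≤ (s : Int) then bStep r row s else row) row

-- item-major row after a list of ribbons
def rowFold (T : Nat) (rs : List Int) (row : List (Option Int)) : List (Option Int) :=
  rs.foldl (fun row r => rowPass r T row) row

-- partially updated row (positions 1..k rewritten)
def curB (r : Int) (prev : List (Option Int)) (T k : Nat) : List (Option Int) :=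
  (List.range (T + 1)).map (fun j => if 1 ≤ j ∧ j ≤ k then cellF r prev j else prev.getD j none)

-- A's partially updated row i (rest of the row still at its initialised value)
def curA (r : Int) (prev : List (Option Int)) (T k : Nat) : List (Option Int) :=
  (List.range (T + 1)).map (fun j => if 1 ≤ j ∧ j ≤ k then cellF r prev j else if j = 0 then some 0 else none)

theorem getD_map_range' {α : Type} (f : Nat → α) (n j : Nat) (d : α) :
    ((List.range n).map f).getD j d = if j < n then f j else d := by
  simp [List.getD_eq_getElem?_getD]
  split <;> simp [List.getElem?_range, *]

theorem getD_set_self' {α : Type} (l : List α) (s : Nat) (v d : α) (h : s < l.length) :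
    (l.set s v).getD s d = v := by
  simp [List.getD_eq_getElem?_getD, List.getElem?_set_self, h]

theorem getD_set_ne' {α : Type} (l : List α) (s j : Nat) (v d : α) (h : j ≠ s) :
    (l.set s v).getD j d = l.getD j d := by
  simp [List.getD_eq_getElem?_getD, List.getElem?_set_ne (Ne.symm h)]

theorem ext_getD {l1 l2 : List (Option Int)} (T : Nat) (h1 : l1.length = T + 1) (h2 : l2.length = T + 1)
    (h : ∀ j, j ≤ T → l1.getD j none = l2.getD j none) : l1 = l2 := by
  apply List.ext_getElem (by omega)
  intro j hj1 hj2
  have := h j (by omega)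
  rwa [List.getD_eq_getElem l1 none hj1, List.getD_eq_getElem l2 none hj2] at this

theorem bStep_length (r : Int) (row : List (Option Int)) (s : Nat) : (bStep r row s).length = row.length := by
  unfold bStep
  split <;> [rfl; skip]
  split <;> [simp; skip]
  split <;> simp

theorem bStep_getD (r : Int) (row : List (Option Int)) (s : Nat) (hs : s < row.length) (j : Nat) :
    (bStep r row s).getD j none =
      if j = s then omax (row.getD s none) (oadd1 (row.getD (s - r.toNat) none)) else row.getD j none := by
  unfold bStep
  by_cases hj : j = s
  · subst hj
    rcases hp : row.getD (j - r.toNat) none with _ | p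
    · rcases hc : row.getD j none with _ | c <;> simp [hp, hc, omax, oadd1]
    · rcases hc : row.getD j none with _ | c
      · simp only [hp, hc, if_pos rfl, omax, oadd1, Option.map_some]
        exact getD_set_self' _ _ _ _ hs
      · simp only [hp, hc, if_pos rfl, omax, oadd1, Option.map_some]
        split
        · rw [getD_set_self' _ _ _ _ hs]; congr 1; omega
        · rw [hc]; congr 1; omega
  · rw [if_neg hj]
    rcases hp : row.getD (s - r.toNat) none with _ | p
    · simp only [hp]
    · simp only [hp]
      rcases hc : row.getD s none with _ | c
      · simp only [hc]
        exact getD_set_ne' _ _ _ _ _ hj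
      · simp only [hc]
        split
        · exact getD_set_ne' _ _ _ _ _ hj
        · rfl

theorem cellF_succ (r : Int) (prev : List (Option Int)) (s : Nat) :
    cellF r prev (s + 1) =
      if r ≤ ((s : Int) + 1) then
        (if 1 ≤ r then omax (prev.getD (s + 1) none) (oadd1 (cellF r prev (s + 1 - r.toNat)))
         else omax (prev.getD (s + 1) none) (oadd1 (prev.getD (s + 1) none)))
      else prev.getD (s + 1) none := by
  rw [cellF]
  simp

theorem curB_length (r : Int) (prev : List (Option Int)) (T k : Nat) : (curB r prev T k).length = T + 1 := by
  simp [curB]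

theorem curB_getD (r : Int) (prev : List (Option Int)) (T k : Nat) (hlen : prev.length = T + 1) (j : Nat) :
    (curB r prev T k).getD j none = if 1 ≤ j ∧ j ≤ k ∧ j < T + 1 then cellF r prev j else prev.getD j none := by
  rw [curB, getD_map_range']
  by_cases hj : j < T + 1
  · rw [if_pos hj]
    by_cases hin : 1 ≤ j ∧ j ≤ k
    · rw [if_pos hin, if_pos (by omega)]
    · rw [if_neg hin, if_neg (by omega)]
  · rw [if_neg hj, if_neg (by omega), List.getD_eq_default]
    omega

theorem curB_zero (r : Int) (prev : List (Option Int)) (T : Nat) (hlen : prev.length = T + 1) :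
    curB r prev T 0 = prev := by
  apply ext_getD T (curB_length r prev T 0) hlen
  intro j hj
  rw [curB_getD r prev T 0 hlen]
  split_ifs with h
  · omega
  · rfl

theorem rowPass_aux (r : Int) (prev : List (Option Int)) (T : Nat)
    (hlen : prev.length = T + 1) (h0 : prev.getD 0 none = some 0) (hr : 0 ≤ r) :
    ∀ k, k ≤ T →
      (List.range k).foldl (fun row s0 =>
        let s : Nat := s0 + 1
        if r ≤ (s : Int) then bStep r row s else row) prev = curB r prev T k := by
  intro k
  induction k with
  | zero => intro _; simp [curB_zero r prev T hlen]
  | succ k ih =>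
    intro hk
    rw [List.range_succ, List.foldl_append, ih (by omega)]
    simp only [List.foldl_cons, List.foldl_nil]
    by_cases hcmp : r ≤ ((k : Nat) + 1 : Nat)
    · rw [if_pos (by exact_mod_cast hcmp)]
      apply ext_getD T (by rw [bStep_length, curB_length]) (curB_length r prev T (k+1))
      intro j hj
      rw [bStep_getD r _ (k+1) (by rw [curB_length]; omega) j]
      rw [curB_getD r prev T (k+1) hlen j]
      by_cases hjk : j = k + 1
      · subst hjk
        rw [if_pos rfl, if_pos (by omega)]
        rw [curB_getD r prev T k hlen (k+1), if_neg (by omega)]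
        rw [cellF_succ]
        rw [if_pos (by exact_mod_cast hcmp)]
        by_cases hr1 : 1 ≤ r
        · rw [if_pos hr1]
          congr 1
          rw [curB_getD r prev T k hlen (k + 1 - r.toNat)]
          by_cases hz : 1 ≤ k + 1 - r.toNat
          · rw [if_pos (by refine ⟨hz, ?_, by omega⟩; omega)]
          · have hz0 : k + 1 - r.toNat = 0 := by omega
            rw [hz0, if_neg (by omega)]
            rw [h0, show cellF r prev 0 = some 0 from by rw [cellF]]
        · have hr0 : r = 0 := by omega
          rw [if_neg hr1]
          congr 1
          rw [curB_getD r prev T k hlen (k + 1 - r.toNat)]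
          rw [hr0]
          simp
      · rw [if_neg hjk, curB_getD r prev T k hlen j]
        by_cases hin : 1 ≤ j ∧ j ≤ k ∧ j < T + 1
        · rw [if_pos hin, if_pos (by omega)]
        · rw [if_neg hin, if_neg (by omega)]
    · rw [if_neg (by exact_mod_cast hcmp)]
      apply ext_getD T (curB_length r prev T k) (curB_length r prev T (k+1))
      intro j hj
      rw [curB_getD r prev T k hlen j, curB_getD r prev T (k+1) hlen j]
      by_cases hjk : j = k + 1
      · subst hjk
        rw [if_neg (by omega), if_pos (by omega)]
        rw [cellF_succ, if_neg (by push_cast; omega)]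
      · by_cases hin : 1 ≤ j ∧ j ≤ k ∧ j < T + 1
        · rw [if_pos hin, if_pos (by omega)]
        · rw [if_neg hin, if_neg (by omega)]

theorem rowPass_eq (r : Int) (prev : List (Option Int)) (T : Nat)
    (hlen : prev.length = T + 1) (h0 : prev.getD 0 none = some 0) (hr : 0 ≤ r) :
    rowPass r T prev = curB r prev T T := by
  exact rowPass_aux r prev T hlen h0 hr T (Nat.le_refl T)

theorem getD_append_mid {α : Type} (A B : List α) (cur : α) (d : α) :
    (A ++ cur :: B).getD A.length d = cur := by
  simp [List.getD_eq_getElem?_getD]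

theorem set_append_mid {α : Type} (A B : List α) (cur v : α) :
    (A ++ cur :: B).set A.length v = A ++ v :: B := by
  rw [List.set_append_right _ _ (Nat.le_refl _)]
  simp

theorem getD_append_mid' {α : Type} (A B : List α) (cur : α) (d : α) (n : Nat) (h : n = A.length) :
    (A ++ cur :: B).getD n d = cur := by
  subst h; exact getD_append_mid A B cur d

theorem set_append_mid' {α : Type} (A B : List α) (cur v : α) (n : Nat) (h : n = A.length) :
    (A ++ cur :: B).set n v = A ++ v :: B := by
  subst h; exact set_append_mid A B cur v

theorem pyGet?_append_mid {α : Type} (A B : List α) (cur : α) :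
    PySem.List.pyGet? (A ++ cur :: B) (A.length : Int) = some cur := by
  rw [PySem.List.pyGet?_natCast]
  simp

theorem pyGet?_append_mid'' {α : Type} (A B : List α) (cur : α) (n : Nat) (h : n = A.length) :
    PySem.List.pyGet? (A ++ cur :: B) (n : Int) = some cur := by
  subst h; exact pyGet?_append_mid A B cur

theorem pyGet?_last {α : Type} (A B : List α) (cur prev : α) (hA : A.getLast? = some prev) :
    PySem.List.pyGet? (A ++ cur :: B) ((A.length : Int) - 1) = some prev := by
  obtain ⟨A', rfl⟩ := List.getLast?_eq_some_iff.mp hA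
  have h1 : (((A' ++ [prev]).length : Int)) - 1 = ((A'.length : Nat) : Int) := by
    simp
  rw [h1, PySem.List.pyGet?_natCast, List.append_assoc]
  simp

theorem initRow_getD (T j : Nat) : (initRow T).getD j none = if j = 0 then some 0 else none := by
  cases j with
  | zero => rfl
  | succ j =>
    simp only [initRow, List.getD_cons_succ]
    rw [List.getD]
    rcases h : (List.replicate T (none : Option Int))[j]? with _ | v
    · rfl
    · have := List.mem_of_getElem? h
      rw [List.eq_of_mem_replicate this]
      rfl

theorem curA_length (r : Int) (prev : List (Option Int)) (T k : Nat) : (curA r prev T k).length = T + 1 := by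
  simp [curA]

theorem curA_getD (r : Int) (prev : List (Option Int)) (T k : Nat) (j : Nat) :
    (curA r prev T k).getD j none =
      if 1 ≤ j ∧ j ≤ k ∧ j < T + 1 then cellF r prev j else if j = 0 then some 0 else none := by
  rw [curA, getD_map_range']
  by_cases hj : j < T + 1
  · rw [if_pos hj]
    by_cases hin : 1 ≤ j ∧ j ≤ k
    · rw [if_pos hin, if_pos (by omega)]
    · rw [if_neg hin, if_neg (show ¬(1 ≤ j ∧ j ≤ k ∧ j < T + 1) by omega)]
  · rw [if_neg hj, if_neg (show ¬(1 ≤ j ∧ j ≤ k ∧ j < T + 1) by omega),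
        if_neg (show ¬(j = 0) by omega)]

theorem curA_zero (r : Int) (prev : List (Option Int)) (T : Nat) : curA r prev T 0 = initRow T := by
  apply ext_getD T (curA_length r prev T 0) (by simp [initRow])
  intro j hj
  rw [curA_getD, initRow_getD, if_neg (by omega)]

-- A's inner pass rewrites exactly row i, producing curA
theorem aPass_aux (rl : List Int) (T : Nat) (rows rest : List (List (Option Int))) (prev : List (Option Int))
    (hprev0 : rows = [] → prev = initRow T)
    (hprev1 : rows ≠ [] → rows.getLast? = some prev)
    (hrest : ∀ row ∈ rest, row = initRow T)
    (hr0 : 0 ≤ rl.getD rows.length 0) :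
    ∀ k, k ≤ T →
      (List.range k).foldl (aInner rl rows.length) (rows ++ curA (rl.getD rows.length 0) prev T 0 :: rest)
        = rows ++ curA (rl.getD rows.length 0) prev T k :: rest := by
  set r := rl.getD rows.length 0 with hrdef
  have hgeti : ∀ (cur : List (Option Int)) (j : Nat),
      getCell (rows ++ cur :: rest) ((rows.length : Int)) j = cur.getD j none := by
    intro cur j
    rw [getCell, pyGet?_append_mid]
    rfl
  have hset : ∀ (cur : List (Option Int)) (s : Nat) v,
      setCell (rows ++ cur :: rest) rows.length s v = rows ++ cur.set s v :: rest := by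
    intro cur s v
    rw [setCell, getD_append_mid, set_append_mid]
  have hread : ∀ (cur : List (Option Int)) (s : Nat), 1 ≤ s → s ≤ T →
      (rows = [] → cur.getD s none = none) →
      getCell (rows ++ cur :: rest) ((rows.length : Int) - 1) s = prev.getD s none := by
    intro cur s hs1 hsT hcur
    by_cases hrw : rows = []
    · subst hrw
      simp only [List.length_nil, Nat.cast_zero, zero_sub, List.nil_append]
      rw [getCell, PySem.List.pyGet?_neg_one]
      rcases hrest2 : rest.getLast? with _ | lastrow
      · have : rest = [] := by
          cases rest with
          | nil => rfl
          | cons a l => simp at hrest2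
        subst this
        simp only [List.getLast?_singleton, Option.getD_some]
        rw [hcur rfl, hprev0 rfl, initRow_getD, if_neg (by omega)]
      · have hlast : (cur :: rest).getLast? = some lastrow := by
          cases rest with
          | nil => simp at hrest2
          | cons a l => rw [List.getLast?_cons_cons]; exact hrest2
        rw [hlast]
        have hmem : lastrow ∈ rest := by
          have := List.mem_of_getLast? hrest2
          exact this
        rw [hrest lastrow hmem]
        simp only [Option.getD_some]
        rw [initRow_getD, if_neg (by omega), hprev0 rfl, initRow_getD, if_neg (by omega)]
    · rw [getCell, pyGet?_last rows rest cur prev (hprev1 hrw)]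
      rfl
  intro k
  induction k with
  | zero => intro _; simp
  | succ k ih =>
    intro hk
    rw [List.range_succ, List.foldl_append, ih (by omega)]
    simp only [List.foldl_cons, List.foldl_nil]
    simp only [aInner]
    have hA0 : (curA r prev T k).getD (k + 1) none = none := by
      rw [curA_getD, if_neg (by omega), if_neg (by omega)]
    have hprevk1 : rows = [] → prev.getD (k + 1) none = none := by
      intro hh
      rw [hprev0 hh, initRow_getD, if_neg (by omega)]
    set cur' : List (Option Int) :=
      if 0 < rows.length then (curA r prev T k).set (k + 1) (prev.getD (k + 1) none)
      else curA r prev T k with hcur'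
    have hdp' :
        (if 0 < rows.length then
            setCell (rows ++ curA r prev T k :: rest) rows.length (k + 1)
              (getCell (rows ++ curA r prev T k :: rest) ((rows.length : Int) - 1) (k + 1))
          else rows ++ curA r prev T k :: rest) = rows ++ cur' :: rest := by
      rw [hcur']
      by_cases hi : 0 < rows.length
      · rw [if_pos hi, if_pos hi,
            hread (curA r prev T k) (k + 1) (by omega) (by omega) (fun _ => hA0), hset]
      · rw [if_neg hi, if_neg hi]
    rw [hdp']
    have hcur'len : cur'.length = T + 1 := by
      rw [hcur']
      split <;> simp [curA_length]
    have hcur'k1 : cur'.getD (k + 1) none = prev.getD (k + 1) none := by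
      rw [hcur']
      split
      · exact getD_set_self' _ _ _ _ (by rw [curA_length]; omega)
      · rename_i hi
        rw [hA0, hprevk1 (by simpa [List.length_pos_iff] using hi)]
    have hcur'ne : ∀ j, j ≠ k + 1 → cur'.getD j none = (curA r prev T k).getD j none := by
      intro j hj
      rw [hcur']
      split
      · exact getD_set_ne' _ _ _ _ _ hj
      · rfl
    have hcurne : rows = [] → cur'.getD (k + 1) none = none := fun _ => by
      rw [hcur'k1]; exact hprevk1 (by assumption)
    have hlt : k + 1 < cur'.length := by rw [hcur'len]; omega
    by_cases hcmp : r ≤ ((k : Nat) + 1 : Nat)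
    · rw [if_pos (by exact_mod_cast hcmp)]
      rw [hread cur' (k + 1) (by omega) (by omega) hcurne, hgeti, hset]
      congr 1
      have hV : cur'.getD (k + 1 - r.toNat) none =
          if 1 ≤ r then cellF r prev (k + 1 - r.toNat) else prev.getD (k + 1) none := by
        by_cases hr1 : 1 ≤ r
        · rw [if_pos hr1]
          have hj' : k + 1 - r.toNat ≤ k := by omega
          rw [hcur'ne _ (by omega), curA_getD]
          by_cases hz : 1 ≤ k + 1 - r.toNat
          · rw [if_pos (by omega)]
          · rw [if_neg (by omega), if_pos (by omega),
               show k + 1 - r.toNat = 0 from by omega,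
               show cellF r prev 0 = some 0 from by rw [cellF]]
        · rw [if_neg hr1, show r.toNat = 0 from by omega, Nat.sub_zero, hcur'k1]
      rw [hV]
      congr 2
      apply ext_getD T (by rw [List.length_set, hcur'len]) (curA_length r prev T (k + 1))
      intro j hj
      by_cases hjk : j = k + 1
      · subst hjk
        rw [getD_set_self' _ _ _ _ hlt, curA_getD, if_pos (show 1 ≤ k + 1 ∧ k + 1 ≤ k + 1 ∧ k + 1 < T + 1 by omega), cellF_succ,
            if_pos (show r ≤ ((k : Int) + 1) from by exact_mod_cast hcmp)]
        by_cases hr1 : 1 ≤ r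
        · rw [if_pos hr1, if_pos hr1]
        · rw [if_neg hr1, if_neg hr1]
      · rw [getD_set_ne' _ _ _ _ _ hjk, hcur'ne _ hjk, curA_getD, curA_getD]
        by_cases hin : 1 ≤ j ∧ j ≤ k ∧ j < T + 1
        · rw [if_pos hin, if_pos (show 1 ≤ j ∧ j ≤ k + 1 ∧ j < T + 1 by omega)]
        · rw [if_neg hin, if_neg (show ¬(1 ≤ j ∧ j ≤ k + 1 ∧ j < T + 1) by omega)]
    · rw [if_neg (by exact_mod_cast hcmp)]
      congr 2
      apply ext_getD T hcur'len (curA_length r prev T (k + 1))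
      intro j hj
      by_cases hjk : j = k + 1
      · subst hjk
        rw [hcur'k1, curA_getD, if_pos (by omega), cellF_succ,
            if_neg (show ¬ r ≤ ((k : Int) + 1) from by push_cast at hcmp ⊢; omega)]
      · rw [hcur'ne _ hjk, curA_getD, curA_getD]
        by_cases hin : 1 ≤ j ∧ j ≤ k ∧ j < T + 1
        · rw [if_pos hin, if_pos (show 1 ≤ j ∧ j ≤ k + 1 ∧ j < T + 1 by omega)]
        · rw [if_neg hin, if_neg (show ¬(1 ≤ j ∧ j ≤ k + 1 ∧ j < T + 1) by omega)]

theorem curA_eq_curB (r : Int) (prev : List (Option Int)) (T : Nat) (h0 : prev.getD 0 none = some 0) :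
    curA r prev T T = curB r prev T T := by
  unfold curA curB
  apply List.map_congr_left
  intro j hj
  rw [List.mem_range] at hj
  by_cases hin : 1 ≤ j ∧ j ≤ T
  · rw [if_pos hin, if_pos hin]
  · rw [if_neg hin, if_neg hin]
    have hj0 : j = 0 := by omega
    subst hj0
    exact h0.symm

theorem rowFold_inv (T : Nat) (rs : List Int) (row : List (Option Int))
    (hlen : row.length = T + 1) (h0 : row.getD 0 none = some 0) (hr : ∀ r ∈ rs, 0 ≤ r) :
    (rowFold T rs row).length = T + 1 ∧ (rowFold T rs row).getD 0 none = some 0 := by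
  induction rs generalizing row with
  | nil => exact ⟨hlen, h0⟩
  | cons r rs ih =>
    have hr' : 0 ≤ r := hr r List.mem_cons_self
    have hstep : rowFold T (r :: rs) row = rowFold T rs (rowPass r T row) := rfl
    rw [hstep, rowPass_eq r row T hlen h0 hr']
    exact ih (curB r row T T)
      (curB_length r row T T)
      (by rw [curB_getD r row T T hlen 0, if_neg (by omega)]; exact h0)
      (fun x hx => hr x (List.mem_cons_of_mem r hx))

theorem dp1_eq (m T : Nat) :
    (List.range m).foldl (fun dp i => setCell dp i 0 (some 0)) (List.replicate m (List.replicate (T + 1) none))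
      = List.replicate m (initRow T) := by
  have aux : ∀ k, k ≤ m →
      (List.range k).foldl (fun dp i => setCell dp i 0 (some 0)) (List.replicate m (List.replicate (T + 1) none))
        = List.replicate k (initRow T) ++ List.replicate (m - k) (List.replicate (T + 1) none) := by
    intro k
    induction k with
    | zero => intro _; simp
    | succ k ih =>
      intro hk
      rw [List.range_succ, List.foldl_append, ih (by omega)]
      simp only [List.foldl_cons, List.foldl_nil]
      rw [show m - k = (m - (k + 1)) + 1 from by omega, List.replicate_succ]
      rw [setCell, getD_append_mid' _ _ _ _ _ (by simp), set_append_mid' _ _ _ _ _ (by simp)]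
      rw [show (List.replicate (T + 1) (none : Option Int)).set 0 (some 0) = initRow T from by
            rw [List.replicate_succ]; rfl]
      rw [List.replicate_succ' (n := k)]
      simp
  rw [aux m (Nat.le_refl m), Nat.sub_self]
  simp

theorem outer_eq (rl : List Int) (T : Nat) (hr : ∀ r ∈ rl, 0 ≤ r) :
    ∀ k, k ≤ rl.length →
      (List.range k).foldl (fun dp i => (List.range T).foldl (aInner rl i) dp) (List.replicate rl.length (initRow T))
        = (List.range k).map (fun j => rowFold T (rl.take (j + 1)) (initRow T))
            ++ List.replicate (rl.length - k) (initRow T) := by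
  intro k
  induction k with
  | zero => intro _; simp
  | succ k ih =>
    intro hk
    rw [List.range_succ, List.foldl_append, ih (by omega)]
    simp only [List.foldl_cons, List.foldl_nil]
    set f : Nat → List (Option Int) := fun j => rowFold T (rl.take (j + 1)) (initRow T) with hf
    have hkm : k < rl.length := by omega
    have hrk : rl.getD k 0 = rl[k] := List.getD_eq_getElem rl 0 hkm
    have hr0 : 0 ≤ rl.getD k 0 := by rw [hrk]; exact hr _ (List.getElem_mem hkm)
    set prev : List (Option Int) := rowFold T (rl.take k) (initRow T) with hprev
    have hinv := rowFold_inv T (rl.take k) (initRow T) (by simp [initRow])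
      (by rw [initRow]; rfl) (fun x hx => hr x (List.mem_of_mem_take hx))
    have hrows : ((List.range k).map f).length = k := by simp
    have hrepl : List.replicate (rl.length - k) (initRow T)
        = initRow T :: List.replicate (rl.length - (k + 1)) (initRow T) := by
      rw [show rl.length - k = (rl.length - (k + 1)) + 1 from by omega, List.replicate_succ]
    rw [hrepl]
    have happ := aPass_aux rl T ((List.range k).map f) (List.replicate (rl.length - (k + 1)) (initRow T)) prev
      (by intro hnil
          have : k = 0 := by simpa using congrArg List.length hnil
          subst this
          simp [hprev, rowFold])
      (by intro hnil
          have hk0 : 0 < k := by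
            rcases Nat.eq_zero_or_pos k with h | h
            · subst h; simp at hnil
            · exact h
          have hsplit : (List.range k).map f = (List.range (k - 1)).map f ++ [f (k - 1)] := by
            conv_lhs => rw [show k = (k - 1) + 1 from by omega]
            rw [List.range_succ, List.map_append]
            rfl
          rw [hsplit, List.getLast?_concat]
          simp only [hf]
          rw [show k - 1 + 1 = k from by omega, ← hprev])
      (fun row hrow => List.eq_of_mem_replicate hrow)
      (by rw [hrows]; exact hr0)
    rw [hrows] at happ
    have happ2 := happ T (Nat.le_refl T)
    rw [curA_zero] at happ2
    rw [happ2]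
    rw [curA_eq_curB _ _ _ hinv.2, ← rowPass_eq _ _ _ hinv.1 hinv.2 hr0]
    have hfk : rowPass (rl.getD k 0) T prev = f k := by
      simp only [hf, hprev, rowFold]
      rw [show rl.take (k + 1) = rl.take k ++ [rl[k]] from by
            rw [List.take_add_one, List.getElem?_eq_getElem hkm]
            rfl,
          List.foldl_append, hrk]
      rfl
    rw [hfk]
    simp

-- ---- order on {-inf}∪Int and its algebra ----
def ole : Option Int → Option Int → Prop
  | none, _ => True
  | some _, none => False
  | some a, some b => a ≤ b

theorem ole_refl (a : Option Int) : ole a a := by cases a <;> simp [ole]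

theorem ole_trans {a b c : Option Int} (h1 : ole a b) (h2 : ole b c) : ole a c := by
  cases a <;> cases b <;> cases c <;> simp [ole] at * <;> omega

theorem ole_antisymm {a b : Option Int} (h1 : ole a b) (h2 : ole b a) : a = b := by
  cases a <;> cases b <;> simp [ole] at * <;> omega

theorem ole_none (b : Option Int) : ole none b := by simp [ole]

theorem omax_le_left (a b : Option Int) : ole a (omax a b) := by
  cases a <;> cases b <;> simp [ole, omax]

theorem omax_le_right (a b : Option Int) : ole b (omax a b) := by
  cases a <;> cases b <;> simp [ole, omax]

theorem omax_lub {a b c : Option Int} (h1 : ole a c) (h2 : ole b c) : ole (omax a b) c := by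
  cases a <;> cases b <;> cases c <;> simp [ole, omax] at * <;> omega

theorem oadd1_mono {a b : Option Int} (h : ole a b) : ole (oadd1 a) (oadd1 b) := by
  cases a <;> cases b <;> simp [ole, oadd1] at * <;> omega

theorem oadd1_omax (a b : Option Int) : oadd1 (omax a b) = omax (oadd1 a) (oadd1 b) := by
  rcases a with _ | x <;> rcases b with _ | y <;> try rfl
  show some (max x y + 1) = some (max (x + 1) (y + 1))
  rw [max_add_add_right]

theorem bChoose_eq (m v : Option Int) : bChoose m v = omax m (oadd1 v) := by
  rcases v with _ | p
  · rcases m with _ | q <;> rfl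
  · rcases m with _ | q
    · rfl
    · show (if p + 1 > q then some (p + 1) else some q) = some (max q (p + 1))
      split_ifs with h
      · rw [max_eq_right (by omega)]
      · rw [max_eq_left (by omega)]

theorem pvFoldlCongr {α β : Type} (l : List α) (f g : β → α → β) (b : β)
    (h : ∀ acc a, a ∈ l → f acc a = g acc a) : l.foldl f b = l.foldl g b := by
  induction l generalizing b with
  | nil => rfl
  | cons x xs ih =>
    simp only [List.foldl_cons]
    rw [h b x List.mem_cons_self]
    exact ih _ (fun acc a ha => h acc a (List.mem_cons_of_mem x ha))

-- ---- the sum-major optimum M: max piece count totaling exactly s (none = unachievable) ----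
def mstep (f : Nat → Option Int) (s : Nat) (m : Option Int) (r : Int) : Option Int :=
  if 0 < r ∧ r ≤ (s : Int) then omax m (oadd1 (f (s - r.toNat))) else m

def Mf (rl : List Int) : Nat → Nat → Option Int
  | 0, _ => none
  | _ + 1, 0 => some 0
  | fuel + 1, s + 1 => rl.foldl (mstep (Mf rl fuel) (s + 1)) none

def M (rl : List Int) (s : Nat) : Option Int := Mf rl (s + 1) s

theorem Mf_stable (rl : List Int) : ∀ s f1 f2, s < f1 → s < f2 → Mf rl f1 s = Mf rl f2 s := by
  intro s
  induction s using Nat.strong_induction_on with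
  | _ s ih =>
    intro f1 f2 h1 h2
    match f1, f2, s with
    | g1 + 1, g2 + 1, 0 => rfl
    | g1 + 1, g2 + 1, s + 1 =>
      show rl.foldl (mstep (Mf rl g1) (s + 1)) none = rl.foldl (mstep (Mf rl g2) (s + 1)) none
      apply pvFoldlCongr
      intro acc r _
      unfold mstep
      split
      · rename_i hgr
        rw [ih (s + 1 - r.toNat) (by omega) g1 g2 (by omega) (by omega)]
      · rfl

theorem M_zero (rl : List Int) : M rl 0 = some 0 := rfl

theorem M_succ (rl : List Int) (s : Nat) :
    M rl (s + 1) = rl.foldl (mstep (M rl) (s + 1)) none := by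
  show rl.foldl (mstep (Mf rl (s + 1)) (s + 1)) none = _
  apply pvFoldlCongr
  intro acc r _
  unfold mstep
  split
  · rename_i hgr
    rw [Mf_stable rl (s + 1 - r.toNat) (s + 1) (s + 1 - r.toNat + 1) (by omega) (by omega)]
    rfl
  · rfl

theorem fold_ge_acc (f : Nat → Option Int) (s : Nat) (l : List Int) (m : Option Int) :
    ole m (l.foldl (mstep f s) m) := by
  induction l generalizing m with
  | nil => exact ole_refl m
  | cons x xs ih =>
    simp only [List.foldl_cons]
    refine ole_trans ?_ (ih (mstep f s m x))
    unfold mstep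
    split
    · exact omax_le_left _ _
    · exact ole_refl m

theorem fold_ge_elem (f : Nat → Option Int) (s : Nat) (l : List Int)
    (r : Int) (h1 : 0 < r) (h2 : r ≤ (s : Int)) :
    ∀ m, r ∈ l → ole (oadd1 (f (s - r.toNat))) (l.foldl (mstep f s) m) := by
  induction l with
  | nil => intro m hr; cases hr
  | cons x xs ih =>
    intro m hr
    simp only [List.foldl_cons]
    rcases List.mem_cons.mp hr with h | h
    · subst h
      refine ole_trans ?_ (fold_ge_acc f s xs (mstep f s m r))
      unfold mstep
      rw [if_pos ⟨h1, h2⟩]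
      exact omax_le_right _ _
    · exact ih _ h

theorem fold_le (f : Nat → Option Int) (s : Nat) (l : List Int) (X : Option Int)
    (h : ∀ r ∈ l, 0 < r → r ≤ (s : Int) → ole (oadd1 (f (s - r.toNat))) X) :
    ∀ m, ole m X → ole (l.foldl (mstep f s) m) X := by
  induction l with
  | nil => intro m hm; exact hm
  | cons x xs ih =>
    intro m hm
    simp only [List.foldl_cons]
    refine ih (fun r hr => h r (List.mem_cons_of_mem x hr)) _ ?_
    unfold mstep
    split
    · rename_i hg
      exact omax_lub hm (h x List.mem_cons_self hg.1 hg.2)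
    · exact hm

theorem M_ge (rl : List Int) (s : Nat) (hs : 1 ≤ s) (r : Int) (hmem : r ∈ rl)
    (h0 : 0 < r) (hle : r ≤ (s : Int)) : ole (oadd1 (M rl (s - r.toNat))) (M rl s) := by
  obtain ⟨k, rfl⟩ : ∃ k, s = k + 1 := ⟨s - 1, by omega⟩
  rw [M_succ]
  exact fold_ge_elem (M rl) (k + 1) rl r h0 hle none hmem

-- ---- the item-major row values as a function ----
def Ffun (T : Nat) (rs : List Int) (s : Nat) : Option Int :=
  (rowFold T rs (initRow T)).getD s none

theorem F_nil (T s : Nat) : Ffun T [] s = if s = 0 then some 0 else none := by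
  unfold Ffun rowFold
  simp only [List.foldl_nil]
  exact initRow_getD T s

theorem F_zero (T : Nat) (rs : List Int) (hrs : ∀ x ∈ rs, (0 : Int) ≤ x) :
    Ffun T rs 0 = some 0 :=
  (rowFold_inv T rs (initRow T) (by simp [initRow]) rfl hrs).2

theorem F_succ (T : Nat) (rs : List Int) (r : Int) (hrs : ∀ x ∈ rs, (0 : Int) ≤ x) (hr : 1 ≤ r)
    (s : Nat) (hs1 : 1 ≤ s) (hsT : s ≤ T) :
    Ffun T (rs ++ [r]) s =
      if r ≤ (s : Int) then omax (Ffun T rs s) (oadd1 (Ffun T (rs ++ [r]) (s - r.toNat)))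
      else Ffun T rs s := by
  have hinv := rowFold_inv T rs (initRow T) (by simp [initRow]) rfl hrs
  have hfold : rowFold T (rs ++ [r]) (initRow T) = rowPass r T (rowFold T rs (initRow T)) := by
    unfold rowFold
    rw [List.foldl_append]
    rfl
  have hcur : rowFold T (rs ++ [r]) (initRow T) = curB r (rowFold T rs (initRow T)) T T := by
    rw [hfold, rowPass_eq r _ T hinv.1 hinv.2 (by omega)]
  have hgetF : ∀ j, 1 ≤ j → j ≤ T →
      Ffun T (rs ++ [r]) j = cellF r (rowFold T rs (initRow T)) j := by
    intro j hj1 hjT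
    unfold Ffun
    rw [hcur, curB_getD r _ T T hinv.1 j, if_pos (by omega)]
  rw [hgetF s hs1 hsT]
  obtain ⟨k, rfl⟩ : ∃ k, s = k + 1 := ⟨s - 1, by omega⟩
  rw [cellF_succ]
  have hcast : (r ≤ ((k : Int) + 1)) ↔ (r ≤ ((k + 1 : Nat) : Int)) := by push_cast; omega
  by_cases hcmp : r ≤ ((k + 1 : Nat) : Int)
  · rw [if_pos (hcast.mpr hcmp), if_pos hcmp, if_pos hr]
    have hprevS : (rowFold T rs (initRow T)).getD (k + 1) none = Ffun T rs (k + 1) := rfl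
    rw [hprevS]
    congr 2
    by_cases hz : k + 1 - r.toNat = 0
    · rw [hz, show cellF r (rowFold T rs (initRow T)) 0 = some 0 from by rw [cellF]]
      rw [F_zero T (rs ++ [r]) (by
        intro x hx
        rcases List.mem_append.mp hx with h | h
        · exact hrs x h
        · rw [List.mem_singleton.mp h]; omega)]
    · rw [hgetF (k + 1 - r.toNat) (by omega) (by omega)]
  · rw [if_neg (fun h => hcmp (hcast.mp h)), if_neg hcmp]
    rfl

theorem F_superadd (T : Nat) :
    ∀ (rs : List Int), (∀ x ∈ rs, (1 : Int) ≤ x) →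
      ∀ s, s ≤ T → ∀ r ∈ rs, r ≤ (s : Int) →
        ole (oadd1 (Ffun T rs (s - r.toNat))) (Ffun T rs s) := by
  intro rs
  induction rs using List.reverseRecOn with
  | nil => intro _ s _ r hr; cases hr
  | append_singleton rs t ih =>
    intro hall s
    have hallrs : ∀ x ∈ rs, (1 : Int) ≤ x := fun x hx => hall x (List.mem_append.mpr (Or.inl hx))
    have hrs0 : ∀ x ∈ rs, (0 : Int) ≤ x := fun x hx => by have := hallrs x hx; omega
    have ht1 : (1 : Int) ≤ t := hall t (List.mem_append.mpr (Or.inr (List.mem_singleton_self t)))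
    induction s using Nat.strong_induction_on with
    | _ s ih2 =>
    intro hsT r hrmem hrle
    have h1r : (1 : Int) ≤ r := hall r hrmem
    have hs1 : 1 ≤ s := by omega
    rcases List.mem_append.mp hrmem with hrrs | hrt
    · by_cases hts : t ≤ (s : Int)
      · rw [F_succ T rs t hrs0 ht1 s hs1 hsT, if_pos hts]
        by_cases h0 : s - r.toNat = 0
        · rw [h0, F_zero T (rs ++ [t]) (by
            intro x hx
            rcases List.mem_append.mp hx with h | h
            · exact hrs0 x h
            · rw [List.mem_singleton.mp h]; omega)]
          have houter := ih hallrs s hsT r hrrs hrle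
          rw [h0, F_zero T rs hrs0] at houter
          exact ole_trans houter (omax_le_left _ _)
        · by_cases hts' : t ≤ ((s - r.toNat : Nat) : Int)
          · rw [F_succ T rs t hrs0 ht1 (s - r.toNat) (by omega) (by omega), if_pos hts']
            rw [oadd1_omax]
            apply omax_lub
            · exact ole_trans (ih hallrs s hsT r hrrs hrle) (omax_le_left _ _)
            · have harg : s - r.toNat - t.toNat = (s - t.toNat) - r.toNat := by omega
              rw [harg]
              have h3 := ih2 (s - t.toNat) (by omega) (by omega) r hrmem (by omega)
              exact ole_trans (oadd1_mono h3) (omax_le_right _ _)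
          · rw [F_succ T rs t hrs0 ht1 (s - r.toNat) (by omega) (by omega), if_neg hts']
            exact ole_trans (ih hallrs s hsT r hrrs hrle) (omax_le_left _ _)
      · rw [F_succ T rs t hrs0 ht1 s hs1 hsT, if_neg hts]
        by_cases h0 : s - r.toNat = 0
        · rw [h0, F_zero T (rs ++ [t]) (by
            intro x hx
            rcases List.mem_append.mp hx with h | h
            · exact hrs0 x h
            · rw [List.mem_singleton.mp h]; omega)]
          have houter := ih hallrs s hsT r hrrs hrle
          rw [h0, F_zero T rs hrs0] at houter
          exact houter
        · rw [F_succ T rs t hrs0 ht1 (s - r.toNat) (by omega) (by omega), if_neg (by omega)]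
          exact ih hallrs s hsT r hrrs hrle
    · have hrt' : r = t := List.mem_singleton.mp hrt
      subst hrt'
      rw [F_succ T rs r hrs0 h1r s hs1 hsT, if_pos hrle]
      exact omax_le_right _ _

theorem F_le_M (T : Nat) (rl : List Int) (hall : ∀ x ∈ rl, (1 : Int) ≤ x) :
    ∀ rs, rs ⊆ rl → ∀ s, s ≤ T → ole (Ffun T rs s) (M rl s) := by
  intro rs
  induction rs using List.reverseRecOn with
  | nil =>
    intro _ s _
    rw [F_nil]
    rcases Nat.eq_zero_or_pos s with h0 | h1
    · subst h0; rw [if_pos rfl, M_zero]; exact ole_refl _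
    · rw [if_neg (by omega)]; exact ole_none _
  | append_singleton rs t ih =>
    intro hsub s
    have hrs_sub : rs ⊆ rl := (List.subset_append_left rs [t]).trans hsub
    have ht : t ∈ rl := hsub (List.mem_append.mpr (Or.inr (List.mem_singleton_self t)))
    have ht1 : (1 : Int) ≤ t := hall t ht
    have hrs0 : ∀ x ∈ rs, (0 : Int) ≤ x := fun x hx => by
      have := hall x (hrs_sub hx); omega
    induction s using Nat.strong_induction_on with
    | _ s ih2 =>
    intro hsT
    rcases Nat.eq_zero_or_pos s with h0 | h1
    · subst h0
      rw [F_zero T (rs ++ [t]) (by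
        intro x hx
        rcases List.mem_append.mp hx with h | h
        · exact hrs0 x h
        · rw [List.mem_singleton.mp h]; omega), M_zero]
      exact ole_refl _
    · by_cases hts : t ≤ (s : Int)
      · rw [F_succ T rs t hrs0 ht1 s h1 hsT, if_pos hts]
        apply omax_lub
        · exact ih hrs_sub s hsT
        · refine ole_trans (oadd1_mono (ih2 (s - t.toNat) (by omega) (by omega))) ?_
          exact M_ge rl s h1 t ht (by omega) hts
      · rw [F_succ T rs t hrs0 ht1 s h1 hsT, if_neg hts]
        exact ih hrs_sub s hsT

theorem M_le_F (T : Nat) (rl : List Int) (hall : ∀ x ∈ rl, (1 : Int) ≤ x) :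
    ∀ s, s ≤ T → ole (M rl s) (Ffun T rl s) := by
  intro s
  induction s using Nat.strong_induction_on with
  | _ s ih =>
  intro hsT
  rcases Nat.eq_zero_or_pos s with h0 | h1
  · subst h0
    rw [M_zero, F_zero T rl (fun x hx => by have := hall x hx; omega)]
    exact ole_refl _
  · obtain ⟨k, rfl⟩ : ∃ k, s = k + 1 := ⟨s - 1, by omega⟩
    rw [M_succ]
    refine fold_le (M rl) (k + 1) rl (Ffun T rl (k + 1)) ?_ none (ole_none _)
    intro r hr h0r hler
    refine ole_trans (oadd1_mono (ih (k + 1 - r.toNat) (by omega) (by omega))) ?_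
    exact F_superadd T rl hall (k + 1) hsT r hr hler

theorem F_eq_M (T : Nat) (rl : List Int) (hall : ∀ x ∈ rl, (1 : Int) ≤ x) (s : Nat) (hsT : s ≤ T) :
    Ffun T rl s = M rl s :=
  ole_antisymm (F_le_M T rl hall rl (List.Subset.refl rl) s hsT) (M_le_F T rl hall s hsT)

-- ---- B's sum-major loop computes M ----
def bStepS (rl : List Int) (best : List (Option Int)) (s0 : Nat) : List (Option Int) :=
  let s : Nat := s0 + 1
  let m := rl.foldl (fun m r =>
    if 0 < r ∧ r ≤ (s : Int) then bChoose m (best.getD (s - r.toNat) none) else m) none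
  best.set s m

theorem B_inv (rl : List Int) (T : Nat) :
    ∀ k, k ≤ T →
      (List.range k).foldl (bStepS rl) (initRow T)
        = (List.range (T + 1)).map (fun j => if j ≤ k then M rl j else none) := by
  intro k
  induction k with
  | zero =>
    intro _
    simp only [List.range_zero, List.foldl_nil]
    apply ext_getD T (by simp [initRow]) (by simp)
    intro j hj
    rw [initRow_getD, getD_map_range']
    rcases Nat.eq_zero_or_pos j with h0 | h1
    · subst h0
      simp [M_zero]
    · have hL : (if j = 0 then some (0 : Int) else none) = none := if_neg (by omega)
      rw [hL, if_pos (show j < T + 1 by omega), if_neg (show ¬ j ≤ 0 by omega)]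
  | succ k ih =>
    intro hk
    rw [List.range_succ, List.foldl_append, ih (by omega)]
    simp only [List.foldl_cons, List.foldl_nil]
    unfold bStepS
    have hm :
        rl.foldl (fun m r =>
          if 0 < r ∧ r ≤ ((k + 1 : Nat) : Int) then
            bChoose m (((List.range (T + 1)).map (fun j => if j ≤ k then M rl j else none)).getD (k + 1 - r.toNat) none)
          else m) none = M rl (k + 1) := by
      rw [M_succ]
      apply pvFoldlCongr
      intro acc r _
      unfold mstep
      by_cases hg : 0 < r ∧ r ≤ ((k + 1 : Nat) : Int)
      · rw [if_pos hg, if_pos hg, bChoose_eq]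
        congr 2
        rw [getD_map_range', if_pos (by omega), if_pos (by omega)]
      · rw [if_neg hg, if_neg hg]
    simp only [hm]
    apply ext_getD T (by simp) (by simp)
    intro j hj
    by_cases hjk : j = k + 1
    · subst hjk
      rw [getD_set_self' _ _ _ _ (by simp; omega), getD_map_range',
          if_pos (show k + 1 < T + 1 by omega), if_pos (Nat.le_refl (k + 1))]
    · rw [getD_set_ne' _ _ _ _ _ hjk, getD_map_range', getD_map_range',
          if_pos (show j < T + 1 by omega), if_pos (show j < T + 1 by omega)]
      by_cases hle : j ≤ k
      · rw [if_pos hle, if_pos (show j ≤ k + 1 by omega)]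
      · rw [if_neg hle, if_neg (show ¬ j ≤ k + 1 by omega)]

-- ===== VERDICT (by name: the statement is the Claim_ definition above) =====
theorem max_ribbon_cut_count_spec : Claim_equal_max_ribbon_cut_count := by
  intro rl t _hdom hpre
  unfold Spec_max_ribbon_cut_count
  by_cases hg : rl.length = 0 ∨ t ≤ 0
  · have hg' : rl = [] ∨ t ≤ 0 := by
      rcases hg with h | h
      · exact Or.inl (List.length_eq_zero_iff.mp h)
      · exact Or.inr h
    simp only [max_ribbon_cut_count, max_ribbon_cut_count_alt, if_pos hg, if_pos hg']
  · have hg' : ¬(rl = [] ∨ t ≤ 0) := by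
      intro h
      apply hg
      rcases h with h | h
      · exact Or.inl (by simp [h])
      · exact Or.inr h
    have hall : ∀ r ∈ rl, (1 : Int) ≤ r := by
      rcases hpre with h | h | h
      · exact absurd (Or.inr h) hg
      · exact absurd (Or.inl (by simp [h])) hg
      · exact h
    have hr : ∀ r ∈ rl, (0 : Int) ≤ r := fun r hrm => by have := hall r hrm; omega
    simp only [max_ribbon_cut_count, max_ribbon_cut_count_alt, if_neg hg, if_neg hg']
    have hm1 : 1 ≤ rl.length := by
      rcases Nat.eq_zero_or_pos rl.length with h | h
      · exact absurd (Or.inl h) hg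
      · exact h
    rw [dp1_eq rl.length t.toNat, outer_eq rl t.toNat hr rl.length (Nat.le_refl rl.length),
        Nat.sub_self, List.replicate_zero, List.append_nil]
    have hsplit : (List.range rl.length).map (fun j => rowFold t.toNat (rl.take (j + 1)) (initRow t.toNat))
        = (List.range (rl.length - 1)).map (fun j => rowFold t.toNat (rl.take (j + 1)) (initRow t.toNat))
          ++ [rowFold t.toNat rl (initRow t.toNat)] := by
      conv_lhs => rw [show rl.length = (rl.length - 1) + 1 from by omega]
      rw [List.range_succ, List.map_append]
      simp only [List.map_cons, List.map_nil]
      rw [show rl.length - 1 + 1 = rl.length from by omega, List.take_length]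
    rw [hsplit, getCell,
        show ((rl.length : Int) - 1) = ((rl.length - 1 : Nat) : Int) from by omega,
        pyGet?_append_mid'' _ _ _ _ (by simp)]
    have hB : (List.range t.toNat).foldl
        (fun best s0 =>
          let s : Nat := s0 + 1
          let m := rl.foldl (fun m r =>
            if 0 < r ∧ r ≤ (s : Int) then bChoose m (best.getD (s - r.toNat) none) else m) none
          best.set s m) (some 0 :: List.replicate t.toNat none)
        = (List.range (t.toNat + 1)).map (fun j => if j ≤ t.toNat then M rl j else none) :=
      B_inv rl t.toNat t.toNat (Nat.le_refl _)
    rw [hB]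
    have hF : (rowFold t.toNat rl (initRow t.toNat)).getD t.toNat none = M rl t.toNat :=
      F_eq_M t.toNat rl hall t.toNat (Nat.le_refl _)
    simp only [Option.getD_some]
    rw [hF, getD_map_range', if_pos (by omega), if_pos (Nat.le_refl _)]
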